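-- pv_equiv track=rewrite | github.com/ramwin/leetcode | 得分最高的单词集合.py | get_remain_letters
-- ===== SOURCE A (Python) =====
-- def get_remain_letters(word, letters):
--     """
--     从letters里面挑选出字母, 构成word
--     返回剩下的letters.
--     如果无法构成word, 返回None
--     """
--     letters = letters.copy()
--     for letter in word:
--         try:
--             letters.remove(letter)
--         except ValueError:
--             return None
--     return letters
-- ===== SOURCE B (Python) =====
-- def get_remain_letters(word, letters):
--     """
--     从letters里面挑选出字母, 构成word
--     返回剩下的letters.
--     如果无法构成word, 返回None
--     """
--     need = {}
--     for ch in word: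
--         need[ch] = need.get(ch, 0) + 1
--     remain = []
--     for l in letters:
--         if need.get(l, 0) > 0:
--             need[l] = need[l] - 1
--         else:
--             remain.append(l)
--     if any(v > 0 for v in need.values()):
--         return None
--     return remain
-- ===== Notes on version B (the rewrite author's own statement) =====
-- stated objective: faster
-- what changed: Replaced the per-character list.remove scan with a dict counter of word built once and a single pass over letters that skips the first count(c) occurrences of each needed character.
import Mathlib
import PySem

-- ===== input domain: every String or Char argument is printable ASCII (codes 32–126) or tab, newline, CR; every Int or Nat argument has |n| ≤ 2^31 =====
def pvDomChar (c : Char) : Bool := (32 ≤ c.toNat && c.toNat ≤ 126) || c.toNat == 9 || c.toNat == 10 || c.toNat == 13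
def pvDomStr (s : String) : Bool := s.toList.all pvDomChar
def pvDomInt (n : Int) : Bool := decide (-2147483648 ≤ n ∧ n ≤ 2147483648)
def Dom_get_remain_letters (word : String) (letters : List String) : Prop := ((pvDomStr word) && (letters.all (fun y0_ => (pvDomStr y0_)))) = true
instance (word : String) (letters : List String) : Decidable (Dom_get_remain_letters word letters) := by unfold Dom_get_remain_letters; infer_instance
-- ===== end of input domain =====

-- B replaces A's per-character list.remove scan by a counter dict of word and one pass over letters (asymptotically faster); return values agree everywhere.


-- ===== PORT A =====
-- A's loop: for letter in word: letters.remove(letter), ValueError (remove? = none) → return None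
def pvALoop : List Char → List String → Option (List String)
  | [], ls => some ls
  | c :: cs, ls =>
    match PySem.List.remove? ls (String.singleton c) with
    | none => none
    | some ls' => pvALoop cs ls'

def get_remain_letters (word : String) (letters : List String) : Option (List String) :=
  pvALoop word.toList letters

-- ===== PORT B =====
-- B's second loop: skip (decrement) a needed letter, otherwise append it to remain
def pvBLoop : PySem.Dict String Int → List String → List String → PySem.Dict String Int × List String
  | need, remain, [] => (need, remain)
  | need, remain, l :: ls =>
    if 0 < need.getD l 0 then pvBLoop (need.insert l (need.getD l 0 - 1)) remain ls
    else pvBLoop need (remain ++ [l]) ls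

def get_remain_letters_alt (word : String) (letters : List String) : Option (List String) :=
  let need := word.toList.foldl
    (fun d ch => d.insert (String.singleton ch) (d.getD (String.singleton ch) 0 + 1)) PySem.Dict.empty
  let r := pvBLoop need [] letters
  if r.1.values.any (fun v => decide (0 < v)) then none else some r.2

-- ===== PRECONDITION & SPEC =====
def Spec_get_remain_letters (word : String) (letters : List String) (out : Option (List String)) : Prop := out = get_remain_letters_alt word letters
instance (word : String) (letters : List String) (out : Option (List String)) : Decidable (Spec_get_remain_letters word letters out) := by unfold Spec_get_remain_letters; infer_instance

-- ===== CLAIM (what is proved, stated in full; the proofs are below) =====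
def Claim_equal_get_remain_letters : Prop := ∀ (word : String) (letters : List String), Dom_get_remain_letters word letters → Spec_get_remain_letters word letters (get_remain_letters word letters)

-- ===== LEMMAS AND PROOFS =====

-- common reference point: remove the first occurrence of each needed string, recursing on letters
def pvF : List String → List String → Option (List String)
  | ns, [] => if ns = [] then some [] else none
  | ns, l :: ls => if l ∈ ns then pvF (ns.erase l) ls else (pvF ns ls).map (l :: ·)

-- A's loop over chars is the generic remove-all loop over the singleton strings
def pvRemAll : List String → List String → Option (List String)
  | [], ls => some ls
  | n :: ns, ls =>
    match PySem.List.remove? ls n with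
    | none => none
    | some ls' => pvRemAll ns ls'

lemma pvALoop_eq_pvRemAll (cs : List Char) (ls : List String) :
    pvALoop cs ls = pvRemAll (cs.map String.singleton) ls := by
  induction cs generalizing ls with
  | nil => rfl
  | cons c cs ih =>
    simp only [pvALoop, List.map, pvRemAll]
    cases PySem.List.remove? ls (String.singleton c) with
    | none => rfl
    | some ls' => exact ih ls'

lemma pvRemAll_nil_right (ns : List String) :
    pvRemAll ns [] = if ns = [] then some [] else none := by
  cases ns with
  | nil => rfl
  | cons n ns => simp [pvRemAll, PySem.List.remove?]

lemma pvRemAll_cons (ns : List String) (l : String) (ls : List String) :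
    pvRemAll ns (l :: ls) =
      if l ∈ ns then pvRemAll (ns.erase l) ls else (pvRemAll ns ls).map (l :: ·) := by
  induction ns generalizing ls with
  | nil => simp [pvRemAll]
  | cons n ns ih =>
    by_cases hnl : l = n
    · subst hnl
      simp [pvRemAll, PySem.List.remove?_cons_self, List.erase_cons_head]
    · rw [show pvRemAll (n :: ns) (l :: ls) =
          (match PySem.List.remove? (l :: ls) n with
           | none => none
           | some ls' => pvRemAll ns ls') from rfl]
      rw [PySem.List.remove?_cons_of_ne ls hnl]
      cases hrem : PySem.List.remove? ls n with
      | none =>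
        have hn : n ∉ ls := (PySem.List.remove?_eq_none_iff ls n).mp hrem
        by_cases hlm : l ∈ ns
        · have : l ∈ n :: ns := List.mem_cons_of_mem _ hlm
          rw [if_pos this, List.erase_cons_tail (by simp [Ne.symm hnl])]
          simp [pvRemAll, hrem]
        · have : l ∉ n :: ns := by simp [hnl, hlm]
          rw [if_neg this]
          simp [pvRemAll, hrem]
      | some ls' =>
        simp only [Option.map_some]
        rw [ih ls']
        by_cases hlm : l ∈ ns
        · have h1 : l ∈ n :: ns := List.mem_cons_of_mem _ hlm
          rw [if_pos hlm, if_pos h1, List.erase_cons_tail (by simp [Ne.symm hnl])]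
          simp [pvRemAll, hrem]
        · have h1 : l ∉ n :: ns := by simp [hnl, hlm]
          rw [if_neg hlm, if_neg h1]
          simp [pvRemAll, hrem]

lemma pvRemAll_eq_pvF (ls ns : List String) : pvRemAll ns ls = pvF ns ls := by
  induction ls generalizing ns with
  | nil => rw [pvRemAll_nil_right]; rfl
  | cons l ls ih =>
    rw [pvRemAll_cons]
    simp only [pvF]
    by_cases h : l ∈ ns
    · rw [if_pos h, if_pos h, ih]
    · rw [if_neg h, if_neg h, ih]

lemma pvBLoop_spec (ls : List String) (d : PySem.Dict String Int) (ns acc : List String)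
    (hnd : d.keys.Nodup) (hinv : ∀ s, d.getD s 0 = (ns.count s : Int)) :
    (if (pvBLoop d acc ls).1.values.any (fun v => decide (0 < v)) then none
     else some (pvBLoop d acc ls).2) = (pvF ns ls).map (acc ++ ·) := by
  induction ls generalizing d ns acc with
  | nil =>
    simp only [pvBLoop, pvF]
    by_cases hns : ns = []
    · subst hns
      have hall : d.values.any (fun v => decide (0 < v)) = false := by
        rw [PySem.Dict.values_eq_map_keys d hnd 0]
        simp only [List.any_map, List.any_eq_false]
        intro k _
        simp [hinv k]
      simp [hall]
    · obtain ⟨s, hs⟩ := List.exists_mem_of_ne_nil ns hns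
      have hcnt : 0 < ns.count s := List.count_pos_iff.mpr hs
      have hgd : 0 < d.getD s 0 := by rw [hinv s]; exact_mod_cast hcnt
      have hcont : d.contains s = true := by
        by_contra hc
        have := PySem.Dict.getD_of_not_contains d (k := s) (0 : Int)
          (by revert hc; cases d.contains s <;> simp)
        omega
      have hk : s ∈ d.keys := (PySem.Dict.contains_iff_mem_keys d s).mp hcont
      have hany : d.values.any (fun v => decide (0 < v)) = true := by
        rw [PySem.Dict.values_eq_map_keys d hnd 0]
        simp only [List.any_map, List.any_eq_true]
        exact ⟨s, hk, by simp [hgd]⟩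
      simp [hany, hns]
  | cons l ls ih =>
    simp only [pvBLoop, pvF]
    by_cases hl : l ∈ ns
    · have hcnt : 0 < ns.count l := List.count_pos_iff.mpr hl
      have hgd : 0 < d.getD l 0 := by rw [hinv l]; exact_mod_cast hcnt
      rw [if_pos hgd, if_pos hl]
      exact ih (d.insert l (d.getD l 0 - 1)) (ns.erase l) acc
        (PySem.Dict.nodup_keys_insert d l _ hnd)
        (by
          intro s
          rw [PySem.Dict.getD_insert]
          by_cases hsl : s = l
          · subst hsl
            rw [if_pos rfl, hinv s, List.count_erase_self]
            have : 1 ≤ ns.count s := hcnt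
            push_cast [Nat.cast_sub this]
            ring
          · rw [if_neg hsl, hinv s, List.count_erase_of_ne hsl])
    · have hcnt : ns.count l = 0 := List.count_eq_zero.mpr hl
      have hgd : ¬ 0 < d.getD l 0 := by rw [hinv l, hcnt]; simp
      rw [if_neg hgd, if_neg hl]
      rw [ih d ns (acc ++ [l]) hnd hinv]
      cases pvF ns ls with
      | none => rfl
      | some out => simp

-- counter invariant for B's first loop
lemma pvNeed_getD (cs : List Char) (s : String) :
    (cs.foldl (fun d ch => d.insert (String.singleton ch) (d.getD (String.singleton ch) 0 + 1))
      (PySem.Dict.empty : PySem.Dict String Int)).getD s 0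
      = ((cs.map String.singleton).count s : Int) := by
  rw [← List.foldl_map (f := String.singleton)
    (g := fun (d : PySem.Dict String Int) x => d.insert x (d.getD x 0 + 1))]
  rw [PySem.Dict.getD_foldl_insert_add_one]
  simp [PySem.Dict.getD_empty]

lemma pvNeed_nodup (cs : List Char) :
    (cs.foldl (fun d ch => d.insert (String.singleton ch) (d.getD (String.singleton ch) 0 + 1))
      (PySem.Dict.empty : PySem.Dict String Int)).keys.Nodup := by
  exact PySem.Dict.nodup_keys_foldl_insert_key cs String.singleton _ _
    (by simp [PySem.Dict.keys_empty])

-- ===== VERDICT (by name: the statement is the Claim_ definition above) =====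
theorem get_remain_letters_spec : Claim_equal_get_remain_letters := by
  intro word letters _
  unfold Spec_get_remain_letters get_remain_letters get_remain_letters_alt
  rw [pvALoop_eq_pvRemAll, pvRemAll_eq_pvF]
  rw [pvBLoop_spec letters _ (word.toList.map String.singleton) []
    (pvNeed_nodup word.toList) (pvNeed_getD word.toList)]
  simp
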